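-- pv_equiv track=rewrite | github.com/ahmedeagle/ai-agent | services/qa-service/compliance_checker.py | _calculate_severity
-- ===== SOURCE A (Python) =====
-- from typing import List, Dict, Any
--
-- def _calculate_severity(issues: List[Dict[str, Any]]) -> str:
--     """Calculate overall severity"""
--     if not issues:
--         return "NONE"
--
--     severities = [issue.get('severity', 'LOW') for issue in issues]
--
--     if 'HIGH' in severities:
--         return "HIGH"
--     elif 'MEDIUM' in severities:
--         return "MEDIUM"
--     else:
--         return "LOW"
-- ===== SOURCE B (Python) =====
-- def _calculate_severity(issues):
--     """Calculate overall severity"""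
--     if not issues:
--         return "NONE"
--     priority = {'LOW': 0, 'MEDIUM': 1, 'HIGH': 2}
--     names = ['LOW', 'MEDIUM', 'HIGH']
--     return names[max(priority.get(issue.get('severity', 'LOW'), 0) for issue in issues)]
-- ===== Notes on version B (the rewrite author's own statement) =====
-- stated objective: simpler
-- what changed: Replaces the list-of-severities plus two sequential membership scans with a single max-reduction over a rank map (unknown severities rank 0), indexing the result name.
import Mathlib
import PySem

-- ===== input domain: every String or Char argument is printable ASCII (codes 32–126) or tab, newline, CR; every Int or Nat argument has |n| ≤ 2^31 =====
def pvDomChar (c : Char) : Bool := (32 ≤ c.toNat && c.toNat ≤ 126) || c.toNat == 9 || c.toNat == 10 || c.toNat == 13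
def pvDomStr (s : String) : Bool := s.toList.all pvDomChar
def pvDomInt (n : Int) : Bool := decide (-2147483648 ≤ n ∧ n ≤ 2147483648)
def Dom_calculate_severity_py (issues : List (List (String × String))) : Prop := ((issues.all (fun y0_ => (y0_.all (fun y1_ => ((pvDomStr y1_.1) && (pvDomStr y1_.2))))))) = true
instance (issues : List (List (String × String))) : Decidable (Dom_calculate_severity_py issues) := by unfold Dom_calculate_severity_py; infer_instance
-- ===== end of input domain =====

-- B replaces the severity-list plus two membership scans with one max-reduction over a rank map; objective: simpler.

-- ===== PORT A =====
def calculate_severity_py (issues : List (List (String × String))) : String :=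
  if issues = [] then "NONE"
  else
    let severities := issues.map (fun issue => (PySem.Dict.mk issue).getD "severity" "LOW")
    if severities.contains "HIGH" then "HIGH"
    else if severities.contains "MEDIUM" then "MEDIUM"
    else "LOW"

-- ===== PORT B =====
def pvPriority : PySem.Dict String Int :=
  PySem.Dict.mk [("LOW", 0), ("MEDIUM", 1), ("HIGH", 2)]

def calculate_severity_py_alt (issues : List (List (String × String))) : String :=
  if issues = [] then "NONE"
  else
    let names := ["LOW", "MEDIUM", "HIGH"]
    let m := (issues.map (fun issue =>
      pvPriority.getD ((PySem.Dict.mk issue).getD "severity" "LOW") 0)).foldl max 0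
    names.getD m.toNat "LOW"

-- ===== PRECONDITION & SPEC =====
def Spec_calculate_severity_py (issues : List (List (String × String))) (out : String) : Prop := out = calculate_severity_py_alt issues
instance (issues : List (List (String × String))) (out : String) : Decidable (Spec_calculate_severity_py issues out) := by unfold Spec_calculate_severity_py; infer_instance

-- ===== CLAIM (what is proved, stated in full; the proofs are below) =====
def Claim_equal_calculate_severity_py : Prop := ∀ (issues : List (List (String × String))), Dom_calculate_severity_py issues → Spec_calculate_severity_py issues (calculate_severity_py issues)

-- ===== LEMMAS AND PROOFS =====

def pvRank (s : String) : Int := pvPriority.getD s 0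

theorem pvRank_eq (s : String) :
    pvRank s = if s = "HIGH" then 2 else if s = "MEDIUM" then 1 else 0 := by
  unfold pvRank pvPriority
  simp only [PySem.Dict.getD, PySem.Dict.get?_mk_cons, beq_iff_eq]
  by_cases h1 : s = "HIGH"
  · subst h1; decide
  · by_cases h2 : s = "MEDIUM"
    · subst h2; decide
    · by_cases h3 : s = "LOW"
      · subst h3; decide
      · rw [if_neg (fun he : "LOW" = s => h3 he.symm),
            if_neg (fun he : "MEDIUM" = s => h2 he.symm),
            if_neg (fun he : "HIGH" = s => h1 he.symm),
            if_neg h1, if_neg h2]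
        rfl

theorem pvRank_le_two (s : String) : pvRank s ≤ 2 := by
  rw [pvRank_eq]; split_ifs <;> norm_num

theorem pvRank_eq_two (s : String) (h : pvRank s = 2) : s = "HIGH" := by
  rw [pvRank_eq] at h; split_ifs at h <;> simp_all

theorem pvRank_eq_one (s : String) (h : pvRank s = 1) : s = "MEDIUM" := by
  rw [pvRank_eq] at h; split_ifs at h <;> simp_all

theorem pvF_cons (x : Int) (l : List Int) :
    (x :: l).foldl max 0 = max x (l.foldl max 0) := by
  rw [List.foldl_cons, max_comm (0:Int) x, List.foldl_assoc]

theorem pvF_nonneg (l : List Int) : 0 ≤ l.foldl max 0 := by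
  induction l with
  | nil => simp
  | cons x xs ih => rw [pvF_cons]; exact le_trans ih (le_max_right _ _)

theorem pvF_le_of_mem (l : List Int) (x : Int) (hx : x ∈ l) : x ≤ l.foldl max 0 := by
  induction l with
  | nil => simp at hx
  | cons y ys ih =>
      rw [pvF_cons]
      rcases List.mem_cons.mp hx with h | h
      · subst h; exact le_max_left _ _
      · exact le_trans (ih h) (le_max_right _ _)

theorem pvF_zero_or_mem (l : List Int) : l.foldl max 0 = 0 ∨ l.foldl max 0 ∈ l := by
  induction l with
  | nil => left; simp
  | cons x xs ih =>
      rw [pvF_cons]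
      rcases le_total x (xs.foldl max 0) with h | h
      · rw [max_eq_right h]
        rcases ih with h0 | hm
        · left; exact h0
        · right; exact List.mem_cons_of_mem _ hm
      · rw [max_eq_left h]; right; exact List.mem_cons_self

theorem pvF_le_two (sevs : List String) : (sevs.map pvRank).foldl max 0 ≤ 2 := by
  induction sevs with
  | nil => simp
  | cons s rest ih =>
      rw [List.map_cons, pvF_cons]
      exact max_le (pvRank_le_two s) ih

theorem pvF_ne_of_not_mem (sevs : List String) (t : String) (k : Int) (hk : k ≠ 0)
    (hrank : ∀ s, pvRank s = k → s = t) (h : t ∉ sevs) :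
    (sevs.map pvRank).foldl max 0 ≠ k := by
  intro hF
  rcases pvF_zero_or_mem (sevs.map pvRank) with h0 | hm
  · exact hk (hF ▸ h0)
  · rw [hF] at hm
    rcases List.mem_map.mp hm with ⟨s, hs, hrs⟩
    exact h ((hrank s hrs) ▸ hs)

-- the fold of ranks characterised against A\'s two membership scans
theorem fold_rank_char (sevs : List String) :
    (if sevs.contains "HIGH" then "HIGH"
     else if sevs.contains "MEDIUM" then "MEDIUM" else "LOW")
    = ["LOW", "MEDIUM", "HIGH"].getD ((sevs.map pvRank).foldl max 0).toNat "LOW" := by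
  have hle := pvF_le_two sevs
  have hge := pvF_nonneg (sevs.map pvRank)
  by_cases hh : ("HIGH" : String) ∈ sevs
  · have h2 : (sevs.map pvRank).foldl max 0 = 2 := by
      have := pvF_le_of_mem (sevs.map pvRank) (pvRank "HIGH")
        (List.mem_map_of_mem hh)
      rw [pvRank_eq] at this
      simp at this
      omega
    rw [h2]
    simp [hh]
  · have hne2 : (sevs.map pvRank).foldl max 0 ≠ 2 :=
      pvF_ne_of_not_mem sevs "HIGH" 2 (by norm_num) pvRank_eq_two hh
    by_cases hm : ("MEDIUM" : String) ∈ sevs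
    · have h1 : (sevs.map pvRank).foldl max 0 = 1 := by
        have := pvF_le_of_mem (sevs.map pvRank) (pvRank "MEDIUM")
          (List.mem_map_of_mem hm)
        rw [pvRank_eq] at this
        simp at this
        omega
      rw [h1]
      simp [hh, hm]
    · have hne1 : (sevs.map pvRank).foldl max 0 ≠ 1 :=
        pvF_ne_of_not_mem sevs "MEDIUM" 1 (by norm_num) pvRank_eq_one hm
      have h0 : (sevs.map pvRank).foldl max 0 = 0 := by omega
      rw [h0]
      simp [hh, hm]

-- ===== VERDICT (by name: the statement is the Claim_ definition above) =====
theorem calculate_severity_py_spec : Claim_equal_calculate_severity_py := by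
  intro issues _
  unfold Spec_calculate_severity_py calculate_severity_py calculate_severity_py_alt
  by_cases h : issues = []
  · simp [h]
  · simp only [if_neg h]
    have := fold_rank_char (issues.map (fun issue => (PySem.Dict.mk issue).getD "severity" "LOW"))
    rw [this, List.map_map]
    rfl
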